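-- pv_equiv track=rewrite | github.com/joopeed/lp1 | 169  Tue, 01 May 2012 17:00:52.py | lab2str
-- ===== SOURCE A (Python) =====
-- def lab2str(lab):
-- 	str = [(len(lab[0])+2)*["="] for i in range(len(lab)+2)]
-- 	for i in range(1,len(str)-1):
-- 		str[i][0]=str[i][len(str[0])-1]='|'
-- 		for j in range(1,len(str[0])-1):
-- 			if lab[i-1][j-1] != 'P':
-- 				str[i][j] = lab[i-1][j-1]
-- 			else:
-- 				str[i][j] = '#'
-- 	result = ""
-- 	for i in range(len(str)-1):
-- 		result += "".join(str[i])+"\n"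
-- 	result += "".join(str[len(str)-1])
-- 	return result
-- ===== SOURCE B (Python) =====
-- def lab2str(lab):
--     w = len(lab[0])
--     border = "=" * (w + 2)
--     lines = [border]
--     for row in lab:
--         lines.append("|" + "".join("#" if row[j] == "P" else row[j] for j in range(w)) + "|")
--     lines.append(border)
--     return "\n".join(lines)
-- ===== Notes on version B (the rewrite author's own statement) =====
-- stated objective: simpler
-- what changed: B never builds A's padded 2-D character matrix filled by index assignments; it computes the '=' border line once and constructs each framed output line directly as a string in one pass per row, joining the lines with '\n'.
import Mathlib
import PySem

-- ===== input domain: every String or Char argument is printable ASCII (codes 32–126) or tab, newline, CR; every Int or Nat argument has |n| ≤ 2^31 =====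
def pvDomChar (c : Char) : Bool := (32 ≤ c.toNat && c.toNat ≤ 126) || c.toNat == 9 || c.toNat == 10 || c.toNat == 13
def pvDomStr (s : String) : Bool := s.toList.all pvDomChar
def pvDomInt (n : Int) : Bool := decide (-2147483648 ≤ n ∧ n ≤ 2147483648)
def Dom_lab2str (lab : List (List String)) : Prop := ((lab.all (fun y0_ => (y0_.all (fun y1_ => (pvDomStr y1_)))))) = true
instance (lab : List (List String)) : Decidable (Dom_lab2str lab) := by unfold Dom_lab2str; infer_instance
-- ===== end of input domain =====

-- B builds each output line directly as a string (border computed once, one line per row)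
-- instead of A's index-filled padded 2-D matrix; objective: simpler.

-- ===== PORT A =====
-- A's mutable matrix `str` is carried as a List (List String); each Python index
-- assignment becomes List.set (all indices written are non-negative loop counters);
-- "".join / string concatenation via PySem.Str.join / ++ (exact).
-- lab[i-1][j-1] is in range for every input admitted by Pre_lab2str (getD default unreachable there).
def lab2str (lab : List (List String)) : String :=
  -- str = [(len(lab[0])+2)*["="] for i in range(len(lab)+2)]
  let s0 : List (List String) :=
    (List.range (lab.length + 2)).map
      (fun _ => List.replicate (((lab.headD []).length) + 2) "=")
  -- for i in range(1, len(str)-1): …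
  let s1 : List (List String) :=
    (List.range' 1 (s0.length - 2)).foldl
      (fun s i =>
        let si0 := s.getD i []
        -- str[i][0] = str[i][len(str[0])-1] = '|'
        let si1 := (si0.set 0 "|").set ((s.headD []).length - 1) "|"
        -- for j in range(1, len(str[0])-1): …
        let si2 :=
          (List.range' 1 ((s.headD []).length - 2)).foldl
            (fun si j =>
              let c := ((lab.getD (i - 1) []).getD (j - 1) "")
              if c ≠ "P" then si.set j c else si.set j "#")
            si1
        s.set i si2)
      s0
  -- result accumulation: result += "".join(str[i]) + "\n"; then the last row
  let r1 :=
    (List.range (s1.length - 1)).foldl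
      (fun r i => r ++ PySem.Str.join "" (s1.getD i []) ++ "\n") ""
  r1 ++ PySem.Str.join "" (s1.getD (s1.length - 1) [])

-- ===== PORT B =====
def lab2str_alt (lab : List (List String)) : String :=
  let w := (lab.headD []).length
  let border := String.ofList (List.replicate (w + 2) '=')
  let lines :=
    [border]
      ++ lab.map (fun row =>
            "|" ++ PySem.Str.join "" ((List.range w).map
                    (fun j => if row.getD j "" = "P" then "#" else row.getD j "")) ++ "|")
      ++ [border]
  PySem.Str.join "\n" lines

-- ===== PRECONDITION & SPEC =====
-- Pre_ excludes exactly the inputs on which Python A raises IndexError (empty lab via lab[0],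
-- or a row shorter than len(lab[0]) via lab[i-1][j-1]); B raises there too.
def Pre_lab2str (lab : List (List String)) : Prop :=
  lab ≠ [] ∧ ∀ row ∈ lab, (lab.headD []).length ≤ row.length
instance (lab : List (List String)) : Decidable (Pre_lab2str lab) := by
  unfold Pre_lab2str; infer_instance
def pvWitness_lab2str : List (List String) := [["P", "."], ["x", "P"]]
def Spec_lab2str (lab : List (List String)) (out : String) : Prop := out = lab2str_alt lab
instance (lab : List (List String)) (out : String) : Decidable (Spec_lab2str lab out) := by
  unfold Spec_lab2str; infer_instance

-- ===== CLAIM (what is proved, stated in full; the proofs are below) =====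
def Claim_equal_lab2str : Prop := ∀ (lab : List (List String)), Dom_lab2str lab → Pre_lab2str lab → Spec_lab2str lab (lab2str lab)

-- ===== LEMMAS AND PROOFS =====

-- a left-to-right fold of `set i …` over the fresh positions of a replicate segment
-- rewrites the segment elementwise; the head (left of the frontier) is preserved
theorem foldl_set_replicate {α : Type} (d : α) (g : Nat → α → α → α) :
    ∀ (n : Nat) (P t : List α) (b : α), P ≠ [] →
      (List.range' P.length n).foldl
          (fun s i => s.set i (g i (s.getD i d) (s.headD d))) (P ++ List.replicate n b ++ t)
        = P ++ (List.range' P.length n).map (fun i => g i b (P.headD d)) ++ t := by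
  intro n
  induction n with
  | zero => intro P t b _; simp
  | succ n ih =>
      intro P t b hP
      have hcons : List.replicate (n+1) b = b :: List.replicate n b := List.replicate_succ
      rw [List.range'_succ, List.foldl_cons]
      have hhead : (P ++ List.replicate (n+1) b ++ t).headD d = P.headD d := by
        cases P with
        | nil => exact absurd rfl hP
        | cons p q => simp
      have hget : (P ++ List.replicate (n+1) b ++ t).getD P.length d = b := by
        rw [hcons]
        simp [List.getD_eq_getElem?_getD]
      have hset : (P ++ List.replicate (n+1) b ++ t).set P.length (g P.length b (P.headD d))
          = (P ++ [g P.length b (P.headD d)]) ++ List.replicate n b ++ t := by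
        rw [hcons]
        simp
      rw [hget, hhead, hset]
      have hP' : (P ++ [g P.length b (P.headD d)]) ≠ [] := by simp
      have hlen : P.length + 1 = (P ++ [g P.length b (P.headD d)]).length := by simp
      have hhd' : (P ++ [g P.length b (P.headD d)]).headD d = P.headD d := by
        cases P with
        | nil => exact absurd rfl hP
        | cons p q => simp
      rw [hlen, ih _ t b hP', hhd']
      simp [List.append_assoc]

theorem map_range_getD {α β : Type} (d : α) (h : α → β) (L : List α) :
    (List.range L.length).map (fun i => h (L.getD i d)) = L.map h := by
  apply List.ext_getElem
  · simp
  · intro i h1 h2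
    simp [List.getD_eq_getElem?_getD, List.getElem?_eq_getElem (by simpa using h1 : i < L.length)]

theorem foldl_range_getD {α β : Type} (d : α) (f : β → α → β) :
    ∀ (L : List α) (acc : β),
      (List.range L.length).foldl (fun r i => f r (L.getD i d)) acc = L.foldl f acc := by
  intro L
  induction L using List.reverseRecOn with
  | nil => intro acc; simp
  | append_singleton L x ih =>
      intro acc
      rw [List.length_append, List.length_cons, List.length_nil, List.range_succ,
          List.foldl_append, List.foldl_append]
      have h1 : (List.range L.length).foldl (fun r i => f r ((L ++ [x]).getD i d)) acc
          = (List.range L.length).foldl (fun r i => f r (L.getD i d)) acc := by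
        apply PySem.List.foldl_congr_mem
        intro acc' i hi
        have hlt : i < L.length := by simpa using hi
        simp [List.getD_eq_getElem?_getD, List.getElem?_append_left hlt]
      rw [h1, ih]
      simp [List.getD_eq_getElem?_getD]

theorem join_empty_cons (a : String) (l : List String) :
    PySem.Str.join "" (a :: l) = a ++ PySem.Str.join "" l := by
  cases l with
  | nil =>
      apply String.toList_inj.mp
      simp [PySem.Str.toList_join, PySem.Chars.join_singleton, PySem.Chars.join_nil]
  | cons b t =>
      apply String.toList_inj.mp
      simp [PySem.Str.toList_join, PySem.Chars.join_cons_cons]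

theorem join_empty_append (l₁ l₂ : List String) :
    PySem.Str.join "" (l₁ ++ l₂) = PySem.Str.join "" l₁ ++ PySem.Str.join "" l₂ := by
  induction l₁ with
  | nil =>
      have h0 : PySem.Str.join "" ([] : List String) = "" := by
        apply String.toList_inj.mp; simp [PySem.Str.toList_join, PySem.Chars.join_nil]
      simp [h0]
  | cons a t ih => simp [join_empty_cons, ih, String.append_assoc]

theorem join_empty_nil : PySem.Str.join "" ([] : List String) = "" := by
  apply String.toList_inj.mp
  simp [PySem.Str.toList_join, PySem.Chars.join_nil]

theorem join_nl_cons (a : String) (l : List String) (h : l ≠ []) :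
    PySem.Str.join "\n" (a :: l) = a ++ "\n" ++ PySem.Str.join "\n" l := by
  cases l with
  | nil => exact absurd rfl h
  | cons b t =>
      apply String.toList_inj.mp
      simp [PySem.Str.toList_join, PySem.Chars.join_cons_cons]

-- "\n".join over (lines ++ [last]) = A's fold with trailing newlines
theorem joinfold {α : Type} (f : α → String) (z : String) :
    ∀ (L : List α) (acc : String),
      (L.foldl (fun r a => r ++ f a ++ "\n") acc) ++ z
        = acc ++ PySem.Str.join "\n" (L.map f ++ [z]) := by
  intro L
  induction L with
  | nil =>
      intro acc
      have h1 : PySem.Str.join "\n" [z] = z := by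
        apply String.toList_inj.mp
        simp [PySem.Str.toList_join, PySem.Chars.join_singleton]
      simp [h1]
  | cons a L ih =>
      intro acc
      rw [List.foldl_cons, ih, List.map_cons, List.cons_append,
          join_nl_cons (f a) (L.map f ++ [z]) (by simp), ← String.append_assoc, ← String.append_assoc]

-- A's inner loop over one padded row, evaluated
theorem inner_eval (w : Nat) (row : List String) :
    (List.range' 1 ((List.replicate (w+2) ("=" : String)).length - 2)).foldl
      (fun si j =>
        if (row.getD (j-1) "") ≠ "P" then si.set j (row.getD (j-1) "") else si.set j "#")
      (((List.replicate (w+2) ("=" : String)).set 0 "|").set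
        ((List.replicate (w+2) ("=" : String)).length - 1) "|")
    = ["|"] ++ (List.range w).map
        (fun j => if row.getD j "" = "P" then "#" else row.getD j "") ++ ["|"] := by
  have hlen : (List.replicate (w+2) ("=" : String)).length = w + 2 := by simp
  rw [hlen]
  have hinit : ((List.replicate (w+2) ("=" : String)).set 0 "|").set (w + 2 - 1) "|"
      = (["|"] : List String) ++ List.replicate w "=" ++ ["|"] := by
    rw [List.replicate_succ]
    simp [List.replicate_succ']
  rw [hinit]
  have hbody : (fun (si : List String) (j : Nat) =>
        if (row.getD (j-1) "") ≠ "P" then si.set j (row.getD (j-1) "") else si.set j "#")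
      = (fun si j => si.set j ((fun (j : Nat) (_ _ : String) =>
          if (row.getD (j-1) "") ≠ "P" then (row.getD (j-1) "") else "#") j (si.getD j "") (si.headD ""))) := by
    funext si j
    exact (apply_ite (si.set j) _ _ _).symm
  rw [hbody]
  have key := foldl_set_replicate ("" : String)
    (fun (j : Nat) (_ _ : String) => if (row.getD (j-1) "") ≠ "P" then (row.getD (j-1) "") else "#")
    w ["|"] ["|"] "=" (by simp)
  simp only [List.length_cons, List.length_nil, Nat.zero_add] at key
  simp only [Nat.add_sub_cancel]
  rw [key]
  have hmap : (List.range' 1 w).map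
        (fun j => if (row.getD (j-1) "") ≠ "P" then (row.getD (j-1) "") else "#")
      = (List.range w).map (fun j => if row.getD j "" = "P" then "#" else row.getD j "") := by
    rw [List.range'_eq_map_range, List.map_map]
    apply List.map_congr_left
    intro j hj
    simp only [Function.comp]
    have h1 : 1 + j - 1 = j := by omega
    rw [h1]
    simp [ite_not]
  rw [hmap]

-- A's outer loop, evaluated: border row, one framed row per lab row, border row
theorem outer_eval (lab : List (List String)) :
    (List.range' 1 lab.length).foldl
      (fun s i => s.set i ((List.range' 1 ((s.headD []).length - 2)).foldl
        (fun si j =>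
          if ((lab.getD (i-1) []).getD (j-1) "") ≠ "P"
          then si.set j ((lab.getD (i-1) []).getD (j-1) "") else si.set j "#")
        (((s.getD i []).set 0 "|").set ((s.headD []).length - 1) "|")))
      (List.replicate (lab.length + 2) (List.replicate ((lab.headD []).length + 2) ("=" : String)))
    = [List.replicate ((lab.headD []).length + 2) ("=" : String)]
      ++ lab.map (fun row => (["|"] : List String)
            ++ (List.range (lab.headD []).length).map
                  (fun j => if row.getD j "" = "P" then "#" else row.getD j "") ++ ["|"])
      ++ [List.replicate ((lab.headD []).length + 2) ("=" : String)] := by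
  have hsplit : List.replicate (lab.length + 2) (List.replicate ((lab.headD []).length + 2) ("=" : String))
      = [List.replicate ((lab.headD []).length + 2) ("=" : String)]
        ++ List.replicate lab.length (List.replicate ((lab.headD []).length + 2) ("=" : String))
        ++ [List.replicate ((lab.headD []).length + 2) ("=" : String)] := by
    have h2 : ∀ (m : Nat) (x : List String), List.replicate (m+2) x = [x] ++ List.replicate m x ++ [x] := by
      intro m x
      rw [show m + 2 = (m+1)+1 from rfl, List.replicate_succ, List.replicate_succ']
      rfl
    exact h2 lab.length _
  rw [hsplit]
  have key := foldl_set_replicate ([] : List String)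
    (fun (i : Nat) (b h : List String) =>
      (List.range' 1 (h.length - 2)).foldl
        (fun si j =>
          if ((lab.getD (i-1) []).getD (j-1) "") ≠ "P"
          then si.set j ((lab.getD (i-1) []).getD (j-1) "") else si.set j "#")
        ((b.set 0 "|").set (h.length - 1) "|"))
    lab.length
    [List.replicate ((lab.headD []).length + 2) ("=" : String)]
    [List.replicate ((lab.headD []).length + 2) ("=" : String)]
    (List.replicate ((lab.headD []).length + 2) ("=" : String)) (by simp)
  simp only [List.length_cons, List.length_nil, Nat.zero_add, List.headD_cons] at key
  rw [key]
  have hrow : ∀ i : Nat,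
      (List.range' 1 ((List.replicate ((lab.headD []).length + 2) ("=" : String)).length - 2)).foldl
        (fun si j =>
          if ((lab.getD (i-1) []).getD (j-1) "") ≠ "P"
          then si.set j ((lab.getD (i-1) []).getD (j-1) "") else si.set j "#")
        (((List.replicate ((lab.headD []).length + 2) ("=" : String)).set 0 "|").set
          ((List.replicate ((lab.headD []).length + 2) ("=" : String)).length - 1) "|")
      = (["|"] : List String)
          ++ (List.range (lab.headD []).length).map
              (fun j => if (lab.getD (i-1) []).getD j "" = "P" then "#" else (lab.getD (i-1) []).getD j "") ++ ["|"] :=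
    fun i => inner_eval (lab.headD []).length (lab.getD (i-1) [])
  rw [List.map_congr_left (fun i _ => hrow i)]
  congr 1
  congr 1
  rw [List.range'_eq_map_range, List.map_map]
  have hshift : ∀ j ∈ List.range lab.length,
      ((fun i => (["|"] : List String)
          ++ (List.range (lab.headD []).length).map
              (fun k => if (lab.getD (i-1) []).getD k "" = "P" then "#" else (lab.getD (i-1) []).getD k "") ++ ["|"])
        ∘ (fun x => 1 + x)) j
      = (fun row => (["|"] : List String)
          ++ (List.range (lab.headD []).length).map
              (fun k => if row.getD k "" = "P" then "#" else row.getD k "") ++ ["|"]) (lab.getD j []) := by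
    intro j hj
    simp only [Function.comp]
    have h1 : 1 + j - 1 = j := by omega
    rw [h1]
  rw [List.map_congr_left hshift]
  exact map_range_getD ([] : List String)
    (fun row => (["|"] : List String)
        ++ (List.range (lab.headD []).length).map
            (fun k => if row.getD k "" = "P" then "#" else row.getD k "") ++ ["|"]) lab

-- A's result accumulation over the evaluated matrix = "\n".join of the joined rows
theorem assemble (R : List String) (M : List (List String)) :
    ((List.range (([R] ++ M ++ [R]).length - 1)).foldl
        (fun r i => r ++ PySem.Str.join "" (([R] ++ M ++ [R]).getD i []) ++ "\n") "")
      ++ PySem.Str.join "" (([R] ++ M ++ [R]).getD (([R] ++ M ++ [R]).length - 1) [])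
    = PySem.Str.join "\n"
        ([PySem.Str.join "" R] ++ M.map (PySem.Str.join "") ++ [PySem.Str.join "" R]) := by
  have hlen : ([R] ++ M ++ [R]).length - 1 = ([R] ++ M).length := by simp
  have hlast : ([R] ++ M ++ [R]).getD (([R] ++ M ++ [R]).length - 1) [] = R := by
    rw [hlen]
    simp [List.getD_eq_getElem?_getD]
  rw [hlast, hlen]
  have hcongr : (List.range ([R] ++ M).length).foldl
        (fun r i => r ++ PySem.Str.join "" (([R] ++ M ++ [R]).getD i []) ++ "\n") ""
      = (List.range ([R] ++ M).length).foldl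
        (fun r i => r ++ PySem.Str.join "" (([R] ++ M).getD i []) ++ "\n") "" := by
    apply PySem.List.foldl_congr_mem
    intro acc i hi
    have hlt : i < ([R] ++ M).length := by simpa using hi
    have hidx : (([R] ++ M) ++ [R])[i]? = ([R] ++ M)[i]? := List.getElem?_append_left hlt
    simp only [List.getD_eq_getElem?_getD]
    rw [hidx]
  rw [hcongr, foldl_range_getD ([] : List String) (fun r l => r ++ PySem.Str.join "" l ++ "\n")]
  rw [joinfold (PySem.Str.join "") (PySem.Str.join "" R) ([R] ++ M) ""]
  simp

theorem lab2str_spec' (lab : List (List String)) (_hpre : Pre_lab2str lab) :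
    lab2str lab = lab2str_alt lab := by
  unfold lab2str lab2str_alt
  simp only [List.map_const', List.length_range, List.length_replicate, Nat.add_sub_cancel]
  rw [outer_eval lab]
  rw [assemble]
  have hborder : PySem.Str.join "" (List.replicate ((lab.headD []).length + 2) "=")
      = String.ofList (List.replicate ((lab.headD []).length + 2) '=') := by
    apply String.toList_inj.mp
    rw [PySem.Str.toList_join]
    simp only [List.map_replicate]
    have h1 : ("" : String).toList = [] := rfl
    have h2 : ("=" : String).toList = ['='] := rfl
    rw [h1, h2]
    rw [show (List.replicate ((lab.headD []).length + 2) ['='])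
          = (List.replicate ((lab.headD []).length + 2) '=').map (fun c => [c]) from by simp]
    rw [PySem.Chars.join_nil_singletons]
    simp
  rw [hborder, List.map_map]
  congr 2
  congr 1
  apply List.map_congr_left
  intro row _
  simp only [Function.comp]
  simp [join_empty_cons, join_empty_append, join_empty_nil, String.append_assoc]

-- ===== VERDICT (by name: the statement is the Claim_ definition above) =====
theorem lab2str_spec : Claim_equal_lab2str := by
  intro lab _ hpre
  exact lab2str_spec' lab hpre
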